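-- pv_equiv track=rewrite | github.com/lydd168/invest_agent | nlp/news_pipeline.py | tag_topics
-- ===== SOURCE A (Python) =====
-- from typing import Dict, Iterable, List, Optional
--
-- _TOPIC_KEYWORDS = {
--     "earnings": {"earnings", "eps", "profit", "quarter"},
--     "guidance": {"guidance", "outlook", "forecast"},
--     "buyback": {"buyback", "repurchase"},
--     "litigation": {"lawsuit", "litigation", "settlement", "court"},
--     "macro": {"inflation", "rates", "fed", "economy"},
-- }
--
-- def tag_topics(items: Iterable[Dict]) -> List[str]:
--     topics: List[str] = []
--     fragments: List[str] = []
--     for item in items: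
--         title = item.get("title") or ""
--         content = item.get("content") or ""
--         fragments.append(title)
--         fragments.append(content)
--     text_blob = " ".join(fragment for fragment in fragments if fragment).lower()
--     for label, keywords in _TOPIC_KEYWORDS.items():
--         if any(keyword in text_blob for keyword in keywords):
--             topics.append(label)
--     return topics
-- ===== SOURCE B (Python) =====
-- from typing import Dict, Iterable, List
--
-- _TOPIC_KEYWORDS = {
--     "earnings": {"earnings", "eps", "profit", "quarter"},
--     "guidance": {"guidance", "outlook", "forecast"},
--     "buyback": {"buyback", "repurchase"},
--     "litigation": {"lawsuit", "litigation", "settlement", "court"},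
--     "macro": {"inflation", "rates", "fed", "economy"},
-- }
--
-- def tag_topics(items: Iterable[Dict]) -> List[str]:
--     # No joined blob: lowercase each item's fields once, then pick labels
--     # (in dict-key order) whose keywords hit any single field directly.
--     texts = [((item.get("title") or "").lower(), (item.get("content") or "").lower())
--              for item in items]
--     return [label for label, keywords in _TOPIC_KEYWORDS.items()
--             if any(any(kw in title or kw in content for kw in keywords)
--                    for title, content in texts)]
-- ===== Notes on version B (the rewrite author's own statement) =====
-- stated objective: alternative
-- what changed: B never builds A's joined lowered text blob: it lowercases each item's title/content once and tests every topic's keywords directly against those per-item fields, then emits labels in dict-key order (correct because keywords contain no spaces, so blob matching equals per-field matching).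
import Mathlib
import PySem

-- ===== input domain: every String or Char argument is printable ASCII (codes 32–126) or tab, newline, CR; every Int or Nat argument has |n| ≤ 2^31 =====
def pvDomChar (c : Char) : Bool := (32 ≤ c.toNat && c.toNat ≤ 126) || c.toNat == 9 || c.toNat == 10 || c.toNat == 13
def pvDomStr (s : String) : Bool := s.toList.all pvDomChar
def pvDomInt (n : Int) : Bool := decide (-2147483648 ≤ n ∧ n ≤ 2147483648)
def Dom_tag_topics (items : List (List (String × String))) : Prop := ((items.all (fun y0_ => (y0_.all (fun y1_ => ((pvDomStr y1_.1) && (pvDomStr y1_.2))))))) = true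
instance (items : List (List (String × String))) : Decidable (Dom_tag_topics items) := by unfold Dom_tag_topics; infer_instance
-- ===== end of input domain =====

-- B removes A's joined text blob: it lowercases each item's two fields once and scans
-- keywords against those fields directly (same output order, same values; objective: alternative decomposition).

-- ===== PORT A =====
-- shared module-level context: _TOPIC_KEYWORDS (dict of label -> set of keywords)
def pvTopicKeywords : List (String × PySem.Set String) :=
  [("earnings", PySem.Set.ofList ["earnings", "eps", "profit", "quarter"]),
   ("guidance", PySem.Set.ofList ["guidance", "outlook", "forecast"]),
   ("buyback", PySem.Set.ofList ["buyback", "repurchase"]),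
   ("litigation", PySem.Set.ofList ["lawsuit", "litigation", "settlement", "court"]),
   ("macro", PySem.Set.ofList ["inflation", "rates", "fed", "economy"])]

-- item.get(k) or ""  (None for a missing key; `or ""` turns None/"" into "")
def pvGetOr (item : List (String × String)) (k : String) : String :=
  ((PySem.Dict.mk item).get? k).getD ""

def tag_topics (items : List (List (String × String))) : List String :=
  let fragments : List String :=
    items.foldl (fun fr item => (fr ++ [pvGetOr item "title"]) ++ [pvGetOr item "content"]) []
  let blob := PySem.Str.lower (PySem.Str.join " " (fragments.filter (fun f => !(f == ""))))
  pvTopicKeywords.foldl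
    (fun tps lk => if (lk.2).any (fun kw => PySem.Str.isIn kw blob) then tps ++ [lk.1] else tps) []

-- ===== PORT B =====
def tag_topics_alt (items : List (List (String × String))) : List String :=
  let texts : List (String × String) :=
    items.map (fun item => (PySem.Str.lower (pvGetOr item "title"), PySem.Str.lower (pvGetOr item "content")))
  (pvTopicKeywords.filter (fun lk =>
      texts.any (fun tc => (lk.2).any (fun kw => PySem.Str.isIn kw tc.1 || PySem.Str.isIn kw tc.2)))).map
    (fun lk => lk.1)

-- ===== PRECONDITION & SPEC =====
def Spec_tag_topics (items : List (List (String × String))) (out : List String) : Prop := out = tag_topics_alt items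
instance (items : List (List (String × String))) (out : List String) : Decidable (Spec_tag_topics items out) := by unfold Spec_tag_topics; infer_instance

-- ===== CLAIM (what is proved, stated in full; the proofs are below) =====
def Claim_equal_tag_topics : Prop := ∀ (items : List (List (String × String))), Dom_tag_topics items → Spec_tag_topics items (tag_topics items)

-- ===== LEMMAS AND PROOFS =====

-- a space-free pattern that is a prefix of a ++ ' ' :: b is a prefix of a
lemma pv_prefix_space : ∀ (a kw b : List Char), ' ' ∉ kw → kw <+: a ++ ' ' :: b → kw <+: a := by
  intro a
  induction a with
  | nil =>
    intro kw b hs h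
    cases kw with
    | nil => exact List.nil_prefix
    | cons c t =>
      rw [List.nil_append] at h
      obtain ⟨hc, -⟩ := List.cons_prefix_cons.mp h
      exact absurd (hc ▸ List.mem_cons_self) hs
  | cons x a ih =>
    intro kw b hs h
    cases kw with
    | nil => exact List.nil_prefix
    | cons c t =>
      rw [List.cons_append] at h
      obtain ⟨hc, ht⟩ := List.cons_prefix_cons.mp h
      exact List.cons_prefix_cons.mpr ⟨hc, ih t b (fun m => hs (List.mem_cons_of_mem c m)) ht⟩

-- a nonempty space-free pattern is inside a ++ ' ' :: b iff it is inside one of the halves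
lemma pv_infix_space (kw : List Char) (hne : kw ≠ []) (hs : ' ' ∉ kw) :
    ∀ (a b : List Char), (kw <:+: a ++ ' ' :: b ↔ kw <:+: a ∨ kw <:+: b) := by
  intro a
  induction a with
  | nil =>
    intro b
    constructor
    · intro h
      rw [List.nil_append] at h
      rcases List.infix_cons_iff.mp h with hp | hi
      · cases kw with
        | nil => exact absurd rfl hne
        | cons c t =>
          obtain ⟨hc, -⟩ := List.cons_prefix_cons.mp hp
          exact absurd (hc ▸ List.mem_cons_self) hs
      · exact Or.inr hi
    · rintro (h | h)
      · rw [List.infix_nil] at h; exact absurd h hne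
      · exact h.trans ⟨[' '], [], by simp⟩
  | cons x a ih =>
    intro b
    constructor
    · intro h
      rw [List.cons_append] at h
      rcases List.infix_cons_iff.mp h with hp | hi
      · rw [← List.cons_append] at hp
        exact Or.inl (pv_prefix_space (x :: a) kw b hs hp).isInfix
      · rcases (ih b).mp hi with h1 | h2
        · exact Or.inl (h1.trans ⟨[x], [], by simp⟩)
        · exact Or.inr h2
    · rintro (h | h)
      · exact h.trans ⟨[], ' ' :: b, by simp⟩
      · exact h.trans ⟨x :: a ++ [' '], [], by simp⟩

-- a nonempty space-free pattern is inside " ".join(parts) iff it is inside one part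
lemma pv_infix_join (kw : List Char) (hne : kw ≠ []) (hs : ' ' ∉ kw) :
    ∀ (ps : List (List Char)), (kw <:+: PySem.Chars.join [' '] ps ↔ ∃ p ∈ ps, kw <:+: p) := by
  intro ps
  induction ps with
  | nil => simp [PySem.Chars.join_nil, List.infix_nil, hne]
  | cons p ps ih =>
    cases ps with
    | nil => simp [PySem.Chars.join_singleton]
    | cons q r =>
      rw [PySem.Chars.join_cons_cons, List.append_assoc, List.singleton_append,
        pv_infix_space kw hne hs, ih]
      simp

-- lower distributes over " ".join (lower is a charwise map and lowerChar ' ' = ' ')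
lemma pv_lower_join : ∀ (ps : List (List Char)),
    PySem.Chars.lower (PySem.Chars.join [' '] ps) = PySem.Chars.join [' '] (ps.map PySem.Chars.lower) := by
  intro ps
  induction ps with
  | nil => simp [PySem.Chars.join_nil, PySem.Chars.lower]
  | cons p ps ih =>
    cases ps with
    | nil => simp [PySem.Chars.join_singleton]
    | cons q r =>
      rw [PySem.Chars.join_cons_cons]
      have hsplit : PySem.Chars.lower (p ++ [' '] ++ PySem.Chars.join [' '] (q :: r))
          = PySem.Chars.lower p ++ [' '] ++ PySem.Chars.lower (PySem.Chars.join [' '] (q :: r)) := by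
        have hsp : PySem.Chars.lowerChar ' ' = ' ' := by decide
        simp [PySem.Chars.lower, hsp]
      rw [hsplit, ih]
      simp only [List.map_cons, PySem.Chars.join_cons_cons]

-- every keyword in the table is nonempty and contains no space
lemma pv_kw_ok : ∀ lk ∈ pvTopicKeywords, ∀ kw ∈ lk.2, kw.toList ≠ [] ∧ ' ' ∉ kw.toList := by
  decide

-- notation for A's intermediate values (proof-only)
def pvFrag (items : List (List (String × String))) : List String :=
  items.flatMap (fun item => [pvGetOr item "title", pvGetOr item "content"])

def pvBlob (items : List (List (String × String))) : String :=
  PySem.Str.lower (PySem.Str.join " " ((pvFrag items).filter (fun f => !(f == ""))))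

-- the keyword-level bridge: kw occurs in A's lowered blob iff it occurs in one lowered field
lemma pv_kw_bridge (kw : String) (items : List (List (String × String)))
    (hne : kw.toList ≠ []) (hs : ' ' ∉ kw.toList) :
    PySem.Str.isIn kw (pvBlob items) =
      (items.map (fun item =>
          (PySem.Str.lower (pvGetOr item "title"), PySem.Str.lower (pvGetOr item "content")))).any
        (fun tc => PySem.Str.isIn kw tc.1 || PySem.Str.isIn kw tc.2) := by
  unfold pvBlob pvFrag
  rw [Bool.eq_iff_iff, PySem.Str.isIn_iff_infix, PySem.Str.toList_lower, PySem.Str.toList_join]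
  have hsep : String.toList " " = [' '] := rfl
  rw [hsep, pv_lower_join, pv_infix_join kw.toList hne hs]
  constructor
  · rintro ⟨p, hp, hkw⟩
    simp only [List.mem_map, List.mem_filter, List.mem_flatMap] at hp
    obtain ⟨-, ⟨f, ⟨⟨item, hit, hf⟩, -⟩, rfl⟩, rfl⟩ := hp
    simp only [List.any_eq_true, List.mem_map, Bool.or_eq_true, PySem.Str.isIn_iff_infix]
    refine ⟨_, ⟨item, hit, rfl⟩, ?_⟩
    simp only [List.mem_cons, List.not_mem_nil, or_false] at hf
    rcases hf with rfl | rfl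
    · simp only [PySem.Str.toList_lower]
      exact Or.inl hkw
    · simp only [PySem.Str.toList_lower]
      exact Or.inr hkw
  · intro h
    simp only [List.any_eq_true, List.mem_map, Bool.or_eq_true, PySem.Str.isIn_iff_infix] at h
    obtain ⟨tc, ⟨item, hit, rfl⟩, hkw⟩ := h
    dsimp only at hkw
    simp only [PySem.Str.toList_lower] at hkw
    have mk : ∀ f : String,
        f ∈ items.flatMap (fun it => [pvGetOr it "title", pvGetOr it "content"]) →
        kw.toList <:+: PySem.Chars.lower f.toList →
        ∃ p ∈ (((items.flatMap (fun it => [pvGetOr it "title", pvGetOr it "content"])).filter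
            (fun f => !(f == ""))).map String.toList).map PySem.Chars.lower,
          kw.toList <:+: p := by
      intro f hf hkwf
      have hne' : ¬ (f = "") := by
        rintro rfl
        rw [show PySem.Chars.lower (String.toList "") = [] from rfl, List.infix_nil] at hkwf
        exact hne hkwf
      refine ⟨PySem.Chars.lower f.toList, ?_, hkwf⟩
      simp only [List.mem_map, List.mem_filter]
      exact ⟨f.toList, ⟨f, ⟨hf, by simp [hne']⟩, rfl⟩, rfl⟩
    rcases hkw with hkw | hkw
    · exact mk (pvGetOr item "title") (List.mem_flatMap.mpr ⟨item, hit, by simp⟩) hkw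
    · exact mk (pvGetOr item "content") (List.mem_flatMap.mpr ⟨item, hit, by simp⟩) hkw

-- swapping the two `any`s
lemma pv_any_comm {α β : Type} (l : List α) (m : List β) (f : α → β → Bool) :
    (l.any fun x => m.any fun y => f x y) = (m.any fun y => l.any fun x => f x y) := by
  rw [Bool.eq_iff_iff]
  simp only [List.any_eq_true]
  tauto

lemma pv_frag_eq (items : List (List (String × String))) :
    items.foldl (fun fr item => (fr ++ [pvGetOr item "title"]) ++ [pvGetOr item "content"]) []
      = pvFrag items := by
  rw [show (fun (fr : List String) item => (fr ++ [pvGetOr item "title"]) ++ [pvGetOr item "content"])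
        = (fun (fr : List String) item => fr ++ [pvGetOr item "title", pvGetOr item "content"]) from
      funext fun fr => funext fun item => by simp]
  rw [PySem.List.foldl_append_eq_flatMap (fun item => [pvGetOr item "title", pvGetOr item "content"]) items []]
  rw [List.nil_append]
  rfl

lemma pv_alt_eq (items : List (List (String × String))) : tag_topics_alt items =
    (pvTopicKeywords.filter (fun lk =>
        (items.map (fun item => (PySem.Str.lower (pvGetOr item "title"), PySem.Str.lower (pvGetOr item "content")))).any
          (fun tc => (lk.2).any (fun kw => PySem.Str.isIn kw tc.1 || PySem.Str.isIn kw tc.2)))).map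
      (fun lk => lk.1) := rfl

lemma pv_a_eq (items : List (List (String × String))) : tag_topics items =
    pvTopicKeywords.foldl
      (fun tps lk => if (lk.2).any (fun kw => PySem.Str.isIn kw (pvBlob items)) then tps ++ [lk.1] else tps)
      [] := by
  have h : tag_topics items =
      pvTopicKeywords.foldl
        (fun tps lk => if (lk.2).any (fun kw => PySem.Str.isIn kw
            (PySem.Str.lower (PySem.Str.join " "
              ((items.foldl (fun fr item => (fr ++ [pvGetOr item "title"]) ++ [pvGetOr item "content"]) []).filter
                (fun f => !(f == "")))))) then tps ++ [lk.1] else tps)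
        [] := rfl
  rw [h, pv_frag_eq items]
  rfl

lemma pv_main (items : List (List (String × String))) : tag_topics items = tag_topics_alt items := by
  rw [pv_a_eq, pv_alt_eq]
  rw [PySem.List.foldl_append_if
      (fun lk : String × PySem.Set String => (lk.2).any (fun kw => PySem.Str.isIn kw (pvBlob items)))
      (fun lk => lk.1) pvTopicKeywords []]
  rw [List.nil_append]
  have hfilt :
      List.filter
          (fun lk : String × PySem.Set String => (lk.2).any (fun kw => PySem.Str.isIn kw (pvBlob items)))
          pvTopicKeywords
        = List.filter
          (fun lk : String × PySem.Set String =>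
            (items.map (fun item => (PySem.Str.lower (pvGetOr item "title"), PySem.Str.lower (pvGetOr item "content")))).any
              (fun tc => (lk.2).any (fun kw => PySem.Str.isIn kw tc.1 || PySem.Str.isIn kw tc.2)))
          pvTopicKeywords := by
    apply List.filter_congr
    intro lk hlk
    rw [pv_any_comm
        (items.map (fun item => (PySem.Str.lower (pvGetOr item "title"), PySem.Str.lower (pvGetOr item "content"))))
        lk.2 (fun tc kw => PySem.Str.isIn kw tc.1 || PySem.Str.isIn kw tc.2)]
    rw [Bool.eq_iff_iff]
    simp only [List.any_eq_true]
    constructor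
    · rintro ⟨kw, hm, hp⟩
      obtain ⟨hne', hs'⟩ := pv_kw_ok lk hlk kw hm
      rw [pv_kw_bridge kw items hne' hs'] at hp
      exact ⟨kw, hm, List.any_eq_true.mp hp⟩
    · rintro ⟨kw, hm, hp⟩
      obtain ⟨hne', hs'⟩ := pv_kw_ok lk hlk kw hm
      refine ⟨kw, hm, ?_⟩
      rw [pv_kw_bridge kw items hne' hs']
      exact List.any_eq_true.mpr hp
  rw [hfilt]

-- ===== VERDICT (by name: the statement is the Claim_ definition above) =====
theorem tag_topics_spec : Claim_equal_tag_topics := by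
  intro items _
  unfold Spec_tag_topics
  exact pv_main items
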